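-- pv_equiv track=rewrite | github.com/daoudz/open-ats-check | job_matcher.py | _extract_degree_requirement
-- ===== SOURCE A (Python) =====
-- def _extract_degree_requirement(text):
--     """Extract minimum degree requirement from job description."""
--     degree_map = {
--         'phd': 5, 'ph.d': 5, 'doctorate': 5, 'doctoral': 5,
--         'master': 4, 'masters': 4, "master's": 4, 'mba': 4,
--         'bachelor': 3, 'bachelors': 3, "bachelor's": 3,
--         'associate': 2,
--         'diploma': 1,
--     }
--     for keyword, level in sorted(degree_map.items(), key=lambda x: -x[1]):
--         if keyword in text:
--             return level
--     return None
-- ===== SOURCE B (Python) =====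
-- def _extract_degree_requirement(text):
--     """Extract minimum degree requirement from job description."""
--     degree_map = {
--         'phd': 5, 'ph.d': 5, 'doctorate': 5, 'doctoral': 5,
--         'master': 4, 'masters': 4, "master's": 4, 'mba': 4,
--         'bachelor': 3, 'bachelors': 3, "bachelor's": 3,
--         'associate': 2,
--         'diploma': 1,
--     }
--     best = None
--     for keyword, level in degree_map.items():
--         if keyword in text and (best is None or level > best):
--             best = level
--     return best
-- ===== Notes on version B (the rewrite author's own statement) =====
-- stated objective: simpler
-- what changed: Drops the sort-descending-then-return-first-match structure; instead a single unordered scan over the keyword map keeps a running maximum of the levels whose keyword occurs in the text.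
import Mathlib
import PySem

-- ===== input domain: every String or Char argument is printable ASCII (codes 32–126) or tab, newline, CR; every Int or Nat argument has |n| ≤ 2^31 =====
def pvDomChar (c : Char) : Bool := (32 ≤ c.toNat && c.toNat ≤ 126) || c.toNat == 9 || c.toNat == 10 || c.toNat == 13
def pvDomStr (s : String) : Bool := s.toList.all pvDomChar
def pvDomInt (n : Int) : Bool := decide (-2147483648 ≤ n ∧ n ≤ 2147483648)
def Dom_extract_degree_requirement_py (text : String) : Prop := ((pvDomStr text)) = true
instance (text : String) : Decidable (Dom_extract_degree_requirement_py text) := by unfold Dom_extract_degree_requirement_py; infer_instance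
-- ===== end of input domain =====

-- B replaces A's "sort descending, return first match" with a single unordered scan keeping a running max (simpler decomposition).


-- ===== PORT A =====
-- the dict literal, as an association list in insertion order
def pvDegreeMap : List (String × Int) :=
  [("phd", 5), ("ph.d", 5), ("doctorate", 5), ("doctoral", 5),
   ("master", 4), ("masters", 4), ("master's", 4), ("mba", 4),
   ("bachelor", 3), ("bachelors", 3), ("bachelor's", 3),
   ("associate", 2), ("diploma", 1)]

-- A's for-loop with early return
def pvFindLoop (text : String) : List (String × Int) → Option Int
  | [] => none
  | (keyword, level) :: rest =>
      if PySem.Str.isIn keyword text then some level else pvFindLoop text rest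

def extract_degree_requirement_py (text : String) : Option Int :=
  pvFindLoop text (PySem.List.sorted pvDegreeMap (fun x => -x.2) false)

-- ===== PORT B =====
-- B's loop body: 'if keyword in text and (best is None or level > best): best = level'
def pvStep (text : String) (best : Option Int) (p : String × Int) : Option Int :=
  if PySem.Str.isIn p.1 text &&
     (match best with | none => true | some b => decide (p.2 > b)) then
    some p.2
  else best

def extract_degree_requirement_py_alt (text : String) : Option Int :=
  pvDegreeMap.foldl (pvStep text) none

-- ===== PRECONDITION & SPEC =====
def Spec_extract_degree_requirement_py (text : String) (out : Option Int) : Prop := out = extract_degree_requirement_py_alt text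
instance (text : String) (out : Option Int) : Decidable (Spec_extract_degree_requirement_py text out) := by unfold Spec_extract_degree_requirement_py; infer_instance

-- ===== CLAIM (what is proved, stated in full; the proofs are below) =====
def Claim_equal_extract_degree_requirement_py : Prop := ∀ (text : String), Dom_extract_degree_requirement_py text → Spec_extract_degree_requirement_py text (extract_degree_requirement_py text)

-- ===== LEMMAS AND PROOFS =====

-- the map's levels are already non-increasing, so the stable sort by -level keeps it unchanged
set_option maxHeartbeats 1000000 in
lemma pvSorted_degreeMap :
    PySem.List.sorted pvDegreeMap (fun x => -x.2) false = pvDegreeMap := by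
  decide

-- once the running max holds b and every remaining level is ≤ b, the fold never changes it
lemma pvFoldl_fixed (text : String) (b : Int) (l : List (String × Int))
    (h : ∀ p ∈ l, p.2 ≤ b) : l.foldl (pvStep text) (some b) = some b := by
  induction l with
  | nil => rfl
  | cons p rest ih =>
      have hp : p.2 ≤ b := h p (List.mem_cons_self ..)
      have : pvStep text (some b) p = some b := by
        unfold pvStep
        simp [show ¬ (p.2 > b) by omega]
      rw [List.foldl_cons, this]
      exact ih fun q hq => h q (List.mem_cons_of_mem _ hq)

-- on a list with non-increasing levels, the running max equals the first match
lemma pvFold_eq_find (text : String) (l : List (String × Int))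
    (h : l.Pairwise (fun a b => b.2 ≤ a.2)) :
    l.foldl (pvStep text) none = pvFindLoop text l := by
  induction l with
  | nil => rfl
  | cons p rest ih =>
      obtain ⟨kw, lvl⟩ := p
      rw [List.pairwise_cons] at h
      rw [List.foldl_cons]
      by_cases hin : PySem.Str.isIn kw text = true
      · have : pvStep text none (kw, lvl) = some lvl := by
          simp only [pvStep, hin, Bool.true_and, if_pos]
        rw [this, pvFoldl_fixed text lvl rest h.1]
        simp only [pvFindLoop, hin, if_pos]
      · rw [Bool.not_eq_true] at hin
        have : pvStep text none (kw, lvl) = none := by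
          simp only [pvStep, hin, Bool.false_and, Bool.false_eq_true, if_neg,
            not_false_eq_true, reduceIte]
        rw [this, ih h.2]
        simp only [pvFindLoop, hin, Bool.false_eq_true, reduceIte]

-- ===== VERDICT (by name: the statement is the Claim_ definition above) =====
theorem extract_degree_requirement_py_spec : Claim_equal_extract_degree_requirement_py := by
  intro text _
  unfold Spec_extract_degree_requirement_py extract_degree_requirement_py
    extract_degree_requirement_py_alt
  rw [pvSorted_degreeMap, pvFold_eq_find text pvDegreeMap (by decide)]
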